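-- pv_equiv track=rewrite | github.com/plmi/crypto-notebooks | parity-hash.py | compute_parity_hash
-- ===== SOURCE A (Python) =====
-- import functools
-- from typing import List
--
-- def compute_parity_hash(plaintext: str) -> int:
--   binary_strings: List[str] = []
--   for character in plaintext:
--     binary_string: str = "{0:b}".format(ord(character)).rjust(8, '0')
--     binary_strings.append(binary_string)
--   hash_binary: str = ''
--   for i in range(8):
--     bytes_at_position_i: List[str] = [binary_string[i] for binary_string in binary_strings]
--     hash_binary += functools.reduce(lambda a, b: str(int(a) ^ int(b)), bytes_at_position_i, '0')
--   return hash_binary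
-- ===== SOURCE B (Python) =====
-- def compute_parity_hash(plaintext: str) -> str:
--   acc = 0
--   for character in plaintext:
--     acc ^= ord(character)
--   out = ''
--   for _ in range(8):
--     out = str(acc & 1) + out
--     acc >>= 1
--   return out
-- ===== Notes on version B (the rewrite author's own statement) =====
-- stated objective: simpler
-- what changed: Replaced the list of per-character 8-bit binary strings and the per-column reduce over 8 positions by a single integer XOR accumulator whose 8 bits are emitted back-to-front by repeated shift/mask.
import Mathlib
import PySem

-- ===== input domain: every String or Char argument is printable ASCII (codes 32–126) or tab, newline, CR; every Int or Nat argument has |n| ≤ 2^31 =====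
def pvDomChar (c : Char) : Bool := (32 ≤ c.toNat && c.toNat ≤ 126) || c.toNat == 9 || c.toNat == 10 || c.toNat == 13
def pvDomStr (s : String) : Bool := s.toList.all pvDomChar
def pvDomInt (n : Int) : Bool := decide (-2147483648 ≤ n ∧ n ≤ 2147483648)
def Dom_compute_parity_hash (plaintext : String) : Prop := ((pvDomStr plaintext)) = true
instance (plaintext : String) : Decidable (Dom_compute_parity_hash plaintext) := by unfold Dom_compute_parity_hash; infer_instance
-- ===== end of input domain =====

-- B replaces A's list of per-character binary strings and per-column reduce by a single
-- integer XOR accumulator whose 8 bits are emitted back-to-front (objective: simpler).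

-- ===== PORT A =====
-- "{0:b}".format(n) for n > 0, digit list (most significant first)
def binCharsAux : Nat → Nat → List Char
  | 0, _ => []
  | fuel + 1, n => if n = 0 then [] else binCharsAux fuel (n / 2) ++ [if n % 2 = 1 then '1' else '0']

def binChars (n : Nat) : List Char := binCharsAux n n  -- fuel = n suffices: n halves each step

-- "{0:b}".format(n) (format(0,'b') = "0")
def pyFormatB (n : Nat) : List Char := if n = 0 then ['0'] else binChars n

-- s.rjust(8, '0')
def rjust8 (l : List Char) : List Char := List.replicate (8 - l.length) '0' ++ l

-- lambda a, b: str(int(a) ^ int(b)) on one-character digit strings (modelled as Char)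
def xorStep (a b : Char) : Char := Char.ofNat (((a.toNat - 48) ^^^ (b.toNat - 48)) + 48)

def compute_parity_hash (plaintext : String) : String :=
  let binary_strings : List (List Char) :=
    plaintext.toList.foldl (fun acc c => acc ++ [rjust8 (pyFormatB c.toNat)]) []
  let hash_binary : List Char :=
    (List.range 8).foldl (fun acc i =>
      acc ++ [(binary_strings.map (fun bs => bs.getD i ' ')).foldl xorStep '0']) []
  String.mk hash_binary

-- ===== PORT B =====
-- acc ^= ord(character), as structural recursion over the characters
def xorCodes : List Char → Nat → Nat
  | [], a => a
  | c :: t, a => xorCodes t (a ^^^ c.toNat)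

-- the 8-iteration loop: out = str(acc & 1) + out; acc >>= 1
def emitBits : Nat → Nat → List Char → List Char
  | 0, _, out => out
  | k + 1, acc, out => emitBits k (acc >>> 1) ((if acc &&& 1 = 1 then '1' else '0') :: out)

def compute_parity_hash_alt (plaintext : String) : String :=
  String.mk (emitBits 8 (xorCodes plaintext.toList 0) [])

-- ===== PRECONDITION & SPEC =====
def Spec_compute_parity_hash (plaintext : String) (out : String) : Prop := out = compute_parity_hash_alt plaintext
instance (plaintext : String) (out : String) : Decidable (Spec_compute_parity_hash plaintext out) := by unfold Spec_compute_parity_hash; infer_instance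

-- ===== CLAIM (what is proved, stated in full; the proofs are below) =====
def Claim_equal_compute_parity_hash : Prop := ∀ (plaintext : String), Dom_compute_parity_hash plaintext → Spec_compute_parity_hash plaintext (compute_parity_hash plaintext)

-- ===== LEMMAS AND PROOFS =====

-- bit b as the digit character A's columns carry
def bitChar (b : Bool) : Char := if b then '1' else '0'

-- the 8-character binary rendering of n < 256, bit by bit (A's side)
theorem render_eq_bits : ∀ n < 256, rjust8 (pyFormatB n) =
    (List.range 8).map (fun i => bitChar (n.testBit (7 - i))) := by
  set_option maxRecDepth 10000 in decide

-- B's emit loop produces the same bit-by-bit rendering for n < 256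
theorem emitBits_eq_bits : ∀ n < 256, emitBits 8 n [] =
    (List.range 8).map (fun i => bitChar (n.testBit (7 - i))) := by
  set_option maxRecDepth 10000 in decide

theorem xorStep_bitChar (x y : Bool) : xorStep (bitChar x) (bitChar y) = bitChar (xor x y) := by
  cases x <;> cases y <;> decide

theorem foldl_bitChar (codes : List Nat) (j : Nat) : ∀ b : Bool,
    (codes.map (fun n => bitChar (n.testBit j))).foldl xorStep (bitChar b)
      = bitChar (codes.foldl (fun a n => xor a (n.testBit j)) b) := by
  induction codes with
  | nil => intro b; rfl
  | cons c t ih => intro b; simp only [List.map_cons, List.foldl_cons, xorStep_bitChar]; exact ih _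

theorem testBit_foldl_xor (codes : List Nat) (j : Nat) : ∀ a : Nat,
    (codes.foldl (fun x n => x ^^^ n) a).testBit j
      = codes.foldl (fun b n => xor b (n.testBit j)) (a.testBit j) := by
  induction codes with
  | nil => intro a; rfl
  | cons c t ih => intro a; simp only [List.foldl_cons, ih, Nat.testBit_xor]

theorem foldl_xor_lt (codes : List Nat) (h : ∀ n ∈ codes, n < 256) : ∀ a < 256,
    codes.foldl (fun x n => x ^^^ n) a < 256 := by
  induction codes with
  | nil => intro a ha; exact ha
  | cons c t ih =>
      intro a ha
      exact ih (fun n hn => h n (List.mem_cons_of_mem _ hn)) _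
        (Nat.xor_lt_two_pow (n := 8) ha (h c (List.mem_cons_self)))

theorem foldl_append_map {α β : Type} (f : α → β) (l : List α) : ∀ acc : List β,
    l.foldl (fun acc x => acc ++ [f x]) acc = acc ++ l.map f := by
  induction l with
  | nil => intro acc; simp
  | cons c t ih => intro acc; simp [ih]

theorem xorCodes_eq_foldl (l : List Char) : ∀ a : Nat,
    xorCodes l a = (l.map Char.toNat).foldl (fun x n => x ^^^ n) a := by
  induction l with
  | nil => intro a; rfl
  | cons c t ih => intro a; simp only [xorCodes, List.map_cons, List.foldl_cons, ih]

theorem compute_parity_hash_spec' (plaintext : String)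
    (hd : Dom_compute_parity_hash plaintext) :
    compute_parity_hash plaintext = compute_parity_hash_alt plaintext := by
  unfold compute_parity_hash compute_parity_hash_alt
  have hcodes : ∀ c ∈ plaintext.toList, c.toNat < 256 := by
    intro c hc
    have := List.all_eq_true.mp hd c hc
    simp only [pvDomChar, Bool.or_eq_true, Bool.and_eq_true, decide_eq_true_eq, beq_iff_eq] at this
    omega
  simp only [foldl_append_map, xorCodes_eq_foldl]
  have hacc : (plaintext.toList.map Char.toNat).foldl (fun x n => x ^^^ n) 0 < 256 :=
    foldl_xor_lt _ (by intro n hn; obtain ⟨c, hc, rfl⟩ := List.mem_map.mp hn; exact hcodes c hc)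
      0 (by norm_num)
  simp only [List.nil_append]
  rw [emitBits_eq_bits _ hacc]
  congr 1
  apply List.map_congr_left
  intro i hi
  have hi8 : i < 8 := List.mem_range.mp hi
  -- each column of A is the corresponding bit of B's accumulator
  have hcol : plaintext.toList.map ((fun bs => bs.getD i ' ') ∘ fun c => rjust8 (pyFormatB c.toNat))
      = plaintext.toList.map (fun c => bitChar (c.toNat.testBit (7 - i))) := by
    apply List.map_congr_left
    intro c hc
    simp only [Function.comp]
    rw [render_eq_bits _ (hcodes c hc)]
    rw [List.getD_eq_getElem _ _ (by simpa using hi8)]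
    simp
  rw [List.map_map, hcol, show plaintext.toList.map (fun c => bitChar (c.toNat.testBit (7 - i)))
      = (plaintext.toList.map Char.toNat).map (fun n => bitChar (n.testBit (7 - i))) by
        simp [List.map_map, Function.comp]]
  rw [show ('0' : Char) = bitChar false from rfl, foldl_bitChar]
  rw [testBit_foldl_xor]
  simp [Nat.zero_testBit]

-- ===== VERDICT (by name: the statement is the Claim_ definition above) =====
theorem compute_parity_hash_spec : Claim_equal_compute_parity_hash := by
  intro p hd
  exact compute_parity_hash_spec' p hd
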